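-- pv_equiv track=rewrite | github.com/Hrishikesh-3459/leetCode | prob_1333.py | filterRestaurants
-- ===== SOURCE A (Python) =====
-- from typing import List
--
-- def filterRestaurants(restaurants: List[List[int]], veganFriendly: int, maxPrice: int, maxDistance: int) -> List[int]:
--     ans = {}
--     if veganFriendly == 1:
--         vf = True
--     else:
--         vf = False
--     for i in restaurants:
--         idi = i[0]
--         ret = i[1]
--         if vf:
--             if i[2] == 0:
--                 continue
--         if i[3] <= maxPrice and i[4] <= maxDistance:
--             if ret in ans:
--                 ans[ret].append(idi)
--             else:
--                 ans[ret] = [idi]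
--     fin = []
--     for i in sorted(ans):
--         if len(ans[i]) == 1:
--             fin.append(ans[i][0])
--         else:
--             for j in sorted(ans[i]):
--                 fin.append(j)
--     return fin[::-1]
-- ===== SOURCE B (Python) =====
-- def filterRestaurants(restaurants, veganFriendly, maxPrice, maxDistance):
--     filtered = [r for r in restaurants
--                 if (veganFriendly != 1 or r[2] != 0)
--                 and r[3] <= maxPrice and r[4] <= maxDistance]
--     filtered.sort(key=lambda r: (r[1], r[0]), reverse=True)
--     return [r[0] for r in filtered]
-- ===== Notes on version B (the rewrite author's own statement) =====
-- stated objective: simpler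
-- what changed: Replaces A's rating-keyed dict of id lists with per-group sorts and a final reversal by a single filter pass plus one composite-key sort (rating, id) descending.
import Mathlib
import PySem

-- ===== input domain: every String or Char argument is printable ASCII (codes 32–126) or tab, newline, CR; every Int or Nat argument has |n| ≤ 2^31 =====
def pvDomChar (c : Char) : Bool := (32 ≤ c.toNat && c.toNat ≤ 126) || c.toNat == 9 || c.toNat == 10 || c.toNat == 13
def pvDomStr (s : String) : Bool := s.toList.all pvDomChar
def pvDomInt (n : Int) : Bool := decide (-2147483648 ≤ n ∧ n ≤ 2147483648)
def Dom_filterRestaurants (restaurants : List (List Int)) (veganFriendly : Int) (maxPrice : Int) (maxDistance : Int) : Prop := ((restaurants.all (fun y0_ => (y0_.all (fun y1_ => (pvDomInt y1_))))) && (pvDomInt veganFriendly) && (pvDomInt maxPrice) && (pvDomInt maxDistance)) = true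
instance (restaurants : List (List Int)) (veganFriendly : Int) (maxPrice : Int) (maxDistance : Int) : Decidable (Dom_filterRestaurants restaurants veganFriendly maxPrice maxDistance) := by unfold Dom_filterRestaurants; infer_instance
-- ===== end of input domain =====

-- B replaces A's rating-keyed dict of id lists (per-group sorts + final reversal) by one filter pass
-- and a single composite-key sort (rating, id) descending — simpler, same O(n log n) cost.

-- ===== PORT A =====
def filterRestaurants (restaurants : List (List Int)) (veganFriendly : Int) (maxPrice : Int) (maxDistance : Int) : List Int :=
  let vf : Bool := if veganFriendly = 1 then true else false
  let ans : PySem.Dict Int (List Int) := restaurants.foldl (fun ans i =>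
    let idi := PySem.List.pyGetD i 0 0
    let ret := PySem.List.pyGetD i 1 0
    if vf ∧ PySem.List.pyGetD i 2 0 = 0 then ans          -- 'continue'
    else if PySem.List.pyGetD i 3 0 ≤ maxPrice ∧ PySem.List.pyGetD i 4 0 ≤ maxDistance then
      match ans.get? ret with
      | some l => ans.insert ret (l ++ [idi])
      | none   => ans.insert ret [idi]
    else ans) PySem.Dict.empty
  let fin : List Int := (PySem.List.sorted ans.keys (fun x => x)).foldl (fun fin i =>
    if (ans.getD i []).length = 1 then fin ++ [PySem.List.pyGetD (ans.getD i []) 0 0]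
    else (PySem.List.sorted (ans.getD i []) (fun x => x)).foldl (fun fin j => fin ++ [j]) fin) []
  (PySem.List.slice? fin none none (-1)).getD []          -- fin[::-1], step -1 never raises

-- ===== PORT B =====
def filterRestaurants_alt (restaurants : List (List Int)) (veganFriendly : Int) (maxPrice : Int) (maxDistance : Int) : List Int :=
  let filtered := restaurants.filter (fun r =>
    decide ((veganFriendly ≠ 1 ∨ PySem.List.pyGetD r 2 0 ≠ 0) ∧
      PySem.List.pyGetD r 3 0 ≤ maxPrice ∧ PySem.List.pyGetD r 4 0 ≤ maxDistance))
  let ordered := PySem.List.sorted2 filtered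
    (fun r => PySem.List.pyGetD r 1 0) (fun r => PySem.List.pyGetD r 0 0) true
  ordered.map (fun r => PySem.List.pyGetD r 0 0)

-- ===== PRECONDITION & SPEC =====
-- Pre_ admits exactly the inputs on which A returns without an IndexError: each row must be long
-- enough for every subscript A actually evaluates on it (i[0], i[1]; i[2] when veganFriendly == 1;
-- i[3] and — only when i[3] ≤ maxPrice, by short-circuit — i[4] when the vegan check passes).
def Pre_filterRestaurants (restaurants : List (List Int)) (veganFriendly : Int) (maxPrice : Int) (maxDistance : Int) : Prop :=
  ∀ row ∈ restaurants, 2 ≤ row.length ∧ (veganFriendly = 1 → 3 ≤ row.length) ∧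
    ((veganFriendly = 1 → PySem.List.pyGetD row 2 0 ≠ 0) →
      4 ≤ row.length ∧ (PySem.List.pyGetD row 3 0 ≤ maxPrice → 5 ≤ row.length))
instance (restaurants : List (List Int)) (veganFriendly : Int) (maxPrice : Int) (maxDistance : Int) : Decidable (Pre_filterRestaurants restaurants veganFriendly maxPrice maxDistance) := by unfold Pre_filterRestaurants; infer_instance

def pvWitness_filterRestaurants : List (List Int) × Int × Int × Int :=
  ([[1, 5, 1, 10, 10], [2, 3, 0, 5, 5], [3, 5, 1, 4, 4]], 1, 20, 20)

def Spec_filterRestaurants (restaurants : List (List Int)) (veganFriendly : Int) (maxPrice : Int) (maxDistance : Int) (out : List Int) : Prop := out = filterRestaurants_alt restaurants veganFriendly maxPrice maxDistance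
instance (restaurants : List (List Int)) (veganFriendly : Int) (maxPrice : Int) (maxDistance : Int) (out : List Int) : Decidable (Spec_filterRestaurants restaurants veganFriendly maxPrice maxDistance out) := by unfold Spec_filterRestaurants; infer_instance

-- ===== CLAIM (what is proved, stated in full; the proofs are below) =====
def Claim_equal_filterRestaurants : Prop := ∀ (restaurants : List (List Int)) (veganFriendly : Int) (maxPrice : Int) (maxDistance : Int), Dom_filterRestaurants restaurants veganFriendly maxPrice maxDistance → Pre_filterRestaurants restaurants veganFriendly maxPrice maxDistance → Spec_filterRestaurants restaurants veganFriendly maxPrice maxDistance (filterRestaurants restaurants veganFriendly maxPrice maxDistance)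

-- ===== LEMMAS AND PROOFS =====

-- proof-side abbreviations: the two row projections, the packed (rating, id) key, its unpacking,
-- the 2^31 bound Dom provides, B's filter predicate and A's dict-update step
def pvK0 (r : List Int) : Int := PySem.List.pyGetD r 0 0
def pvK1 (r : List Int) : Int := PySem.List.pyGetD r 1 0
def pvEnc (r : List Int) : Int := pvK1 r * 8589934592 + pvK0 r
def pvDec (n : Int) : Int := (n + 4294967296) % 8589934592 - 4294967296
def pvB (n : Int) : Prop := -2147483648 ≤ n ∧ n ≤ 2147483648
def pvPred (vfr mp md : Int) (r : List Int) : Bool :=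
  decide ((vfr ≠ 1 ∨ PySem.List.pyGetD r 2 0 ≠ 0) ∧
    PySem.List.pyGetD r 3 0 ≤ mp ∧ PySem.List.pyGetD r 4 0 ≤ md)
def pvUpd (ans : PySem.Dict Int (List Int)) (i : List Int) : PySem.Dict Int (List Int) :=
  match ans.get? (pvK1 i) with
  | some l => ans.insert (pvK1 i) (l ++ [pvK0 i])
  | none   => ans.insert (pvK1 i) [pvK0 i]

lemma pvGetD_mem_or_default (r : List Int) (k : Int) :
    PySem.List.pyGetD r k 0 = 0 ∨ PySem.List.pyGetD r k 0 ∈ r := by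
  simp only [PySem.List.pyGetD, PySem.List.pyGet?]
  rcases h : (PySem.List.pyIdx? r.length k).bind (fun k => r[k]?) with _ | x
  · simp
  · simp only [Option.getD_some]; right
    simp only [Option.bind_eq_some_iff] at h
    obtain ⟨n, _, h2⟩ := h
    simp only [List.getElem?_eq_some_iff] at h2
    obtain ⟨hn, rfl⟩ := h2
    exact List.getElem_mem _

lemma pv_insertBy_congr {α : Type} (b1 b2 : α → α → Bool) (x : α) (ys : List α)
    (h : ∀ y ∈ ys, b1 x y = b2 x y) :
    PySem.List.insertBy b1 x ys = PySem.List.insertBy b2 x ys := by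
  induction ys with
  | nil => rfl
  | cons y ys ih =>
    simp only [PySem.List.insertBy]
    rw [h y (by simp)]
    split
    · rfl
    · rw [ih (fun z hz => h z (by simp [hz]))]

lemma pv_foldl_insertBy_congr {α : Type} (b1 b2 : α → α → Bool) (P : α → Prop)
    (hP : ∀ a b, P a → P b → b1 a b = b2 a b) :
    ∀ (xs acc : List α), (∀ x ∈ xs, P x) → (∀ x ∈ acc, P x) →
      xs.foldl (fun a y => PySem.List.insertBy b1 y a) acc
        = xs.foldl (fun a y => PySem.List.insertBy b2 y a) acc := by
  intro xs
  induction xs with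
  | nil => intro acc _ _; rfl
  | cons y ys ih =>
    intro acc hxs hacc
    simp only [List.foldl_cons]
    rw [pv_insertBy_congr b1 b2 y acc
      (fun z hz => hP y z (hxs y (by simp)) (hacc z hz))]
    exact ih _ (fun z hz => hxs z (by simp [hz]))
      (fun z hz => by
        rw [PySem.List.mem_insertBy] at hz
        rcases hz with rfl | hz
        · exact hxs z (by simp)
        · exact hacc z hz)

lemma pv_flatMap_congr_mem {α β : Type} (K : List α) (f g : α → List β)
    (h : ∀ r ∈ K, f r = g r) : K.flatMap f = K.flatMap g := by
  induction K with
  | nil => rfl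
  | cons r K ih =>
    simp only [List.flatMap_cons]
    rw [h r (by simp), ih (fun z hz => h z (by simp [hz]))]

lemma pv_flatMap_perm_mem {α β : Type} (K : List α) (f g : α → List β)
    (h : ∀ r ∈ K, (f r).Perm (g r)) : (K.flatMap f).Perm (K.flatMap g) := by
  induction K with
  | nil => exact List.Perm.refl _
  | cons r K ih =>
    simp only [List.flatMap_cons]
    exact (h r (by simp)).append (ih (fun z hz => h z (by simp [hz])))

lemma pv_group_perm (key : List Int → Int) :
    ∀ (K : List Int) (F : List (List Int)), K.Nodup → (∀ f ∈ F, key f ∈ K) →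
      (K.flatMap (fun r => F.filter (fun f => decide (key f = r)))).Perm F := by
  intro K
  induction K with
  | nil =>
    intro F _ hcov
    have : F = [] := by
      cases F with
      | nil => rfl
      | cons f F => exact absurd (hcov f (by simp)) (by simp)
    simp [this]
  | cons r K ih =>
    intro F hnd hcov
    simp only [List.flatMap_cons]
    have hrK : r ∉ K := (List.nodup_cons.mp hnd).1
    have step : K.flatMap (fun r' => F.filter (fun f => decide (key f = r')))
        = K.flatMap (fun r' => (F.filter (fun f => !decide (key f = r))).filter
            (fun f => decide (key f = r'))) := by
      apply pv_flatMap_congr_mem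
      intro r' hr'
      rw [List.filter_filter]
      apply List.filter_congr
      intro f _
      by_cases hf : key f = r'
      · simp only [hf, decide_true, Bool.true_and]
        have : ¬ r' = r := fun h => hrK (h ▸ hr')
        simp [this]
      · simp [hf]
    rw [step]
    have hperm := ih (F.filter (fun f => !decide (key f = r))) (List.nodup_cons.mp hnd).2
      (by
        intro f hf
        simp only [List.mem_filter, Bool.not_eq_eq_eq_not, Bool.not_true,
          decide_eq_false_iff_not] at hf
        rcases List.mem_cons.mp (hcov f hf.1) with h | h
        · exact absurd h hf.2
        · exact h)
    exact (List.Perm.append_left _ hperm).trans (List.filter_append_perm _ F)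

lemma pv_getD_upd (d : PySem.Dict Int (List Int)) (i : List Int) (r : Int) :
    (pvUpd d i).getD r [] = if r = pvK1 i then d.getD r [] ++ [pvK0 i] else d.getD r [] := by
  unfold pvUpd
  rcases h : d.get? (pvK1 i) with _ | l
  · rw [PySem.Dict.getD_insert]
    split
    · next heq => subst heq; simp [PySem.Dict.getD, h]
    · rfl
  · rw [PySem.Dict.getD_insert]
    split
    · next heq => subst heq; simp [PySem.Dict.getD, h]
    · rfl

lemma pv_getD_fold : ∀ (F : List (List Int)) (d : PySem.Dict Int (List Int)) (r : Int),
    (F.foldl pvUpd d).getD r []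
      = d.getD r [] ++ (F.filter (fun f => decide (pvK1 f = r))).map pvK0 := by
  intro F
  induction F with
  | nil => intro d r; simp
  | cons f F ih =>
    intro d r
    simp only [List.foldl_cons, List.filter_cons]
    rw [ih]
    by_cases h : pvK1 f = r
    · simp only [h, decide_true]
      rw [pv_getD_upd, if_pos h.symm]
      simp
    · have : ¬ r = pvK1 f := fun hh => h hh.symm
      simp only [h, decide_false, Bool.false_eq_true, if_false]
      rw [pv_getD_upd, if_neg this]

lemma pv_contains_upd (d : PySem.Dict Int (List Int)) (i : List Int) (r : Int) :
    (pvUpd d i).contains r = (decide (pvK1 i = r) || d.contains r) := by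
  unfold pvUpd
  rcases h : d.get? (pvK1 i) with _ | l <;>
    · rw [PySem.Dict.contains_insert]
      congr 1
      rw [Bool.beq_eq_decide_eq]
      simp [eq_comm]

lemma pv_contains_fold : ∀ (F : List (List Int)) (d : PySem.Dict Int (List Int)) (r : Int),
    (F.foldl pvUpd d).contains r = (d.contains r || F.any (fun f => decide (pvK1 f = r))) := by
  intro F
  induction F with
  | nil => intro d r; simp
  | cons f F ih =>
    intro d r
    simp only [List.foldl_cons, List.any_cons]
    rw [ih, pv_contains_upd]
    cases d.contains r <;> cases h : decide (pvK1 f = r) <;> simp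

lemma pv_nodup_fold : ∀ (F : List (List Int)) (d : PySem.Dict Int (List Int)),
    d.keys.Nodup → (F.foldl pvUpd d).keys.Nodup := by
  intro F
  induction F with
  | nil => intro d h; exact h
  | cons f F ih =>
    intro d h
    simp only [List.foldl_cons]
    apply ih
    unfold pvUpd
    rcases d.get? (pvK1 f) with _ | l <;> exact PySem.Dict.nodup_keys_insert _ _ _ h

-- the canonical shape of port A's computation
lemma pvA_eq (rs : List (List Int)) (vfr mp md : Int) :
    filterRestaurants rs vfr mp md
      = (let F := rs.filter (pvPred vfr mp md)
         let ans := F.foldl pvUpd PySem.Dict.empty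
         ((PySem.List.sorted ans.keys (fun x => x)).flatMap
           (fun r => PySem.List.sorted (ans.getD r []) (fun x => x))).reverse) := by
  unfold filterRestaurants
  simp only []
  have hfold : rs.foldl (fun ans i =>
      let idi := PySem.List.pyGetD i 0 0
      let ret := PySem.List.pyGetD i 1 0
      if (if vfr = 1 then true else false) ∧ PySem.List.pyGetD i 2 0 = 0 then ans
      else if PySem.List.pyGetD i 3 0 ≤ mp ∧ PySem.List.pyGetD i 4 0 ≤ md then
        match ans.get? ret with
        | some l => ans.insert ret (l ++ [idi])
        | none   => ans.insert ret [idi]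
      else ans) PySem.Dict.empty
      = (rs.filter (pvPred vfr mp md)).foldl pvUpd PySem.Dict.empty := by
    rw [List.foldl_filter]
    apply PySem.List.foldl_congr_mem
    intro ans i _
    by_cases h1 : vfr = 1 <;> by_cases h2 : PySem.List.pyGetD i 2 0 = 0 <;>
      by_cases h3 : PySem.List.pyGetD i 3 0 ≤ mp ∧ PySem.List.pyGetD i 4 0 ≤ md <;>
      simp only [pvPred, pvUpd, pvK0, pvK1, h1, h2, h3, if_true, if_false] <;>
      simp [h1, h2]
  rw [hfold]
  set ans := (rs.filter (pvPred vfr mp md)).foldl pvUpd PySem.Dict.empty with hans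
  have hloop : (PySem.List.sorted ans.keys (fun x => x)).foldl (fun fin i =>
      if (ans.getD i []).length = 1 then fin ++ [PySem.List.pyGetD (ans.getD i []) 0 0]
      else (PySem.List.sorted (ans.getD i []) (fun x => x)).foldl (fun fin j => fin ++ [j]) fin) []
      = (PySem.List.sorted ans.keys (fun x => x)).flatMap
          (fun r => PySem.List.sorted (ans.getD r []) (fun x => x)) := by
    rw [PySem.List.foldl_congr_mem _ _
      (fun fin r => fin ++ PySem.List.sorted (ans.getD r []) (fun x => x)) _ ?_]
    · rw [PySem.List.foldl_append_eq_flatMap]; simp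
    · intro fin r _
      by_cases hl : (ans.getD r []).length = 1
      · rcases ll : ans.getD r [] with _ | ⟨x, _ | ⟨y, t⟩⟩ <;> rw [ll] at hl <;> simp at hl
        simp only [ll, List.length_cons, List.length_nil]
        rfl
      · rw [if_neg hl]
        exact PySem.List.foldl_append_singleton _ _
  rw [hloop]
  simp [pysem]

-- ===== VERDICT =====
theorem filterRestaurants_spec : Claim_equal_filterRestaurants := by
  intro rest vfr mp md hDom hPre
  unfold Spec_filterRestaurants
  clear hPre
  -- bounds supplied by Dom
  simp only [Dom_filterRestaurants, Bool.and_eq_true, List.all_eq_true, pvDomInt,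
    decide_eq_true_eq] at hDom
  have hbRow : ∀ f ∈ rest.filter (pvPred vfr mp md), ∀ (k : Int), pvB (PySem.List.pyGetD f k 0) := by
    intro f hf k
    rcases pvGetD_mem_or_default f k with h | h
    · rw [h]; exact ⟨by norm_num, by norm_num⟩
    · exact hDom.1.1.1 f (List.mem_filter.mp hf).1 _ h
  clear hDom
  rw [pvA_eq]
  simp only []
  set F := rest.filter (pvPred vfr mp md) with hF
  set ans := F.foldl pvUpd PySem.Dict.empty with hans
  set S := PySem.List.sorted ans.keys (fun x => x) with hS
  -- dictionary characterisation
  have h_getD : ∀ r, ans.getD r [] = (F.filter (fun f => decide (pvK1 f = r))).map pvK0 := by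
    intro r; rw [hans, pv_getD_fold, PySem.Dict.getD_empty, List.nil_append]
  have h_memS : ∀ r ∈ S, ∃ f ∈ F, pvK1 f = r := by
    intro r hr
    rw [hS, PySem.List.mem_sorted] at hr
    rw [← PySem.Dict.contains_iff_mem_keys, hans, pv_contains_fold] at hr
    simp only [PySem.Dict.contains_empty, Bool.false_or, List.any_eq_true,
      decide_eq_true_eq] at hr
    exact hr
  have h_covS : ∀ f ∈ F, pvK1 f ∈ S := by
    intro f hf
    rw [hS, PySem.List.mem_sorted, ← PySem.Dict.contains_iff_mem_keys, hans, pv_contains_fold]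
    simp only [PySem.Dict.contains_empty, Bool.false_or, List.any_eq_true, decide_eq_true_eq]
    exact ⟨f, hf, rfl⟩
  have h_nodupS : S.Nodup := by
    have h1 : ans.keys.Nodup := by
      rw [hans]; exact pv_nodup_fold F PySem.Dict.empty PySem.Dict.nodup_keys_empty
    exact (PySem.List.sorted_perm ans.keys (fun x => x) false).nodup_iff.mpr h1
  have h_ltS : S.Pairwise (· < ·) := by
    have h1 : S.Pairwise (· ≤ ·) := by
      simpa using PySem.List.sorted_pairwise ans.keys (fun x => x)
    exact (h1.and h_nodupS).imp (fun h => lt_of_le_of_ne h.1 h.2)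
  have h_bS : ∀ r ∈ S, pvB r := by
    intro r hr
    obtain ⟨f, hf, rfl⟩ := h_memS r hr
    exact hbRow f hf 1
  set M := F.map pvEnc with hM
  set g := fun r => PySem.List.sorted (ans.getD r []) (fun x => x) with hg
  set L := S.flatMap (fun r => (g r).map (fun i => r * 8589934592 + i)) with hL
  have h_memg : ∀ r (i : Int), i ∈ g r → ∃ f ∈ F, pvK1 f = r ∧ pvK0 f = i := by
    intro r i hi
    have hi2 : i ∈ PySem.List.sorted (ans.getD r []) (fun x => x) := hi
    rw [PySem.List.mem_sorted, h_getD, List.mem_map] at hi2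
    replace hi := hi2
    obtain ⟨f, hf, rfl⟩ := hi
    have := List.mem_filter.mp hf
    exact ⟨f, this.1, by simpa using this.2, rfl⟩
  have h_bg : ∀ r, ∀ i ∈ g r, pvB i := by
    intro r i hi
    obtain ⟨f, hf, _, rfl⟩ := h_memg r i hi
    exact hbRow f hf 0
  -- L is a permutation of the packed keys M
  have hL_perm : L.Perm M := by
    have step1 : ∀ r ∈ S, ((g r).map (fun i => r * 8589934592 + i)).Perm
        ((F.filter (fun f => decide (pvK1 f = r))).map pvEnc) := by
      intro r _
      have h1 : (g r).Perm ((F.filter (fun f => decide (pvK1 f = r))).map pvK0) := by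
        show (PySem.List.sorted (ans.getD r []) (fun x => x)).Perm _
        rw [h_getD]
        exact PySem.List.sorted_perm _ _ _
      have h2 := h1.map (fun i => r * 8589934592 + i)
      have h3 : ((F.filter (fun f => decide (pvK1 f = r))).map pvK0).map
          (fun i => r * 8589934592 + i) = (F.filter (fun f => decide (pvK1 f = r))).map pvEnc := by
        rw [List.map_map]
        apply List.map_congr_left
        intro f hf
        have hr : pvK1 f = r := by simpa using (List.mem_filter.mp hf).2
        simp [pvEnc, hr]
      rw [h3] at h2
      exact h2
    have h4 := pv_flatMap_perm_mem S _ _ step1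
    rw [← List.map_flatMap] at h4
    exact h4.trans ((pv_group_perm pvK1 S F h_nodupS h_covS).map pvEnc)
  -- L is ascending
  have hL_pair : L.Pairwise (· ≤ ·) := by
    rw [hL, List.flatMap_def, List.pairwise_flatten]
    constructor
    · intro l hl
      rw [List.mem_map] at hl
      obtain ⟨r, _, rfl⟩ := hl
      rw [List.pairwise_map]
      have h1 : (g r).Pairwise (· ≤ ·) := by
        show (PySem.List.sorted (ans.getD r []) (fun x => x)).Pairwise _
        simpa using PySem.List.sorted_pairwise (ans.getD r []) (fun x => x)
      exact h1.imp (fun h => by omega)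
    · rw [List.pairwise_map]
      apply h_ltS.imp_of_mem
      intro r r' hr hr' hlt x hx y hy
      rw [List.mem_map] at hx hy
      obtain ⟨i, hi, rfl⟩ := hx
      obtain ⟨j, hj, rfl⟩ := hy
      obtain ⟨hi1, hi2⟩ := h_bg r i hi
      obtain ⟨hj1, hj2⟩ := h_bg r' j hj
      omega
  -- hence L is exactly the ascending sort of M
  have hL_eq : L = PySem.List.sorted M (fun x => x) false := by
    apply List.Perm.eq_of_pairwise (le := (· ≤ ·))
      (fun a b _ _ h1 h2 => le_antisymm h1 h2) hL_pair
    · simpa using PySem.List.sorted_pairwise M (fun x => x)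
    · exact hL_perm.trans (PySem.List.sorted_perm M (fun x => x) false).symm
  -- descending sort of M is the reverse of the ascending one
  have h_rev : PySem.List.sorted M (fun x => x) true
      = (PySem.List.sorted M (fun x => x) false).reverse := by
    apply List.Perm.eq_of_pairwise (le := fun a b : Int => b ≤ a)
      (fun a b _ _ h1 h2 => le_antisymm h2 h1)
    · simpa using PySem.List.sorted_pairwise_rev M (fun x => x)
    · rw [List.pairwise_reverse]
      simpa using PySem.List.sorted_pairwise M (fun x => x)
    · exact (PySem.List.sorted_perm M (fun x => x) true).trans
        (((List.reverse_perm _).trans (PySem.List.sorted_perm M (fun x => x) false)).symm)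
  -- port B computes pvDec of the descending sort of M
  have hB : filterRestaurants_alt rest vfr mp md
      = (PySem.List.sorted M (fun x => x) true).map pvDec := by
    show (PySem.List.sorted2 F (fun r => PySem.List.pyGetD r 1 0)
        (fun r => PySem.List.pyGetD r 0 0) true).map (fun r => PySem.List.pyGetD r 0 0)
      = (PySem.List.sorted M (fun x => x) true).map pvDec
    have hs2 : PySem.List.sorted2 F (fun r => PySem.List.pyGetD r 1 0)
        (fun r => PySem.List.pyGetD r 0 0) true = PySem.List.sorted F pvEnc true := by
      have e1 : PySem.List.sorted2 F (fun r => PySem.List.pyGetD r 1 0)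
          (fun r => PySem.List.pyGetD r 0 0) true
          = F.foldl (fun acc x => PySem.List.insertBy (fun a b =>
              decide (PySem.List.pyGetD b 1 0 < PySem.List.pyGetD a 1 0) ||
                (!decide (PySem.List.pyGetD a 1 0 < PySem.List.pyGetD b 1 0) &&
                  decide (PySem.List.pyGetD b 0 0 < PySem.List.pyGetD a 0 0))) x acc) [] := rfl
      rw [e1, PySem.List.sorted_rev_eq_foldl_insertBy]
      apply pv_foldl_insertBy_congr _ _ (fun f => f ∈ F)
        ?_ F [] (fun x hx => hx) (by simp)
      intro a b ha hb
      have ha0 := hbRow a ha 0; have ha1 := hbRow a ha 1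
      have hb0 := hbRow b hb 0; have hb1 := hbRow b hb 1
      rw [Bool.eq_iff_iff]
      simp only [Bool.or_eq_true, Bool.and_eq_true, Bool.not_eq_eq_eq_not, Bool.not_true,
        decide_eq_true_eq, decide_eq_false_iff_not, pvEnc, pvK0, pvK1]
      obtain ⟨ha01, ha02⟩ := ha0; obtain ⟨ha11, ha12⟩ := ha1
      obtain ⟨hb01, hb02⟩ := hb0; obtain ⟨hb11, hb12⟩ := hb1
      omega
    rw [hs2]
    have h5 : (PySem.List.sorted F pvEnc true).map (fun r => PySem.List.pyGetD r 0 0)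
        = ((PySem.List.sorted F pvEnc true).map pvEnc).map pvDec := by
      rw [List.map_map]
      apply List.map_congr_left
      intro f hf
      rw [PySem.List.mem_sorted] at hf
      obtain ⟨h01, h02⟩ := hbRow f hf 0
      obtain ⟨h11, h12⟩ := hbRow f hf 1
      simp only [Function.comp_apply, pvDec, pvEnc, pvK0, pvK1]
      omega
    rw [h5]
    congr 1
    apply List.Perm.eq_of_pairwise (le := fun a b : Int => b ≤ a)
      (fun a b _ _ h1 h2 => le_antisymm h2 h1)
    · rw [List.pairwise_map]
      exact PySem.List.sorted_pairwise_rev F pvEnc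
    · simpa using PySem.List.sorted_pairwise_rev M (fun x => x)
    · exact ((PySem.List.sorted_perm F pvEnc true).map pvEnc).trans
        (PySem.List.sorted_perm M (fun x => x) true).symm
  -- port A computes pvDec of the same list
  have h_fin : S.flatMap g = L.map pvDec := by
    rw [hL, List.map_flatMap]
    apply pv_flatMap_congr_mem
    intro r hr
    rw [List.map_map]
    have := (List.map_congr_left (l := g r) (f := pvDec ∘ fun i => r * 8589934592 + i)
      (g := fun i => i) ?_).trans (List.map_id _)
    · exact this.symm
    · intro i hi
      obtain ⟨hi1, hi2⟩ := h_bg r i hi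
      obtain ⟨hr1, hr2⟩ := h_bS r hr
      simp only [Function.comp_apply, pvDec]
      omega
  rw [h_fin, hL_eq, hB, h_rev, List.map_reverse]
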